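-- pv_equiv track=rewrite | github.com/Victy0/TCC_Analisador_Politicas | core/steps/summarizer.py | list_idx_of_ignore_distant_senteces
-- ===== SOURCE A (Python) =====
-- def list_idx_of_ignore_distant_senteces(list_idx):
--
--     # instanciação da lista que retornar os índeces que devem ser removidos
--     list_remove = []
--
--     for i, value in enumerate(list_idx):
--
--         before_can_remove = False
--         after_can_remove = False
--
--         if i > 0:
--             # distância fixada em 7 entre índices das sentenças
--             before_can_remove = True if (value - list_idx[i-1]) > 7 else False
--
--         if i < (len(list_idx) - 1):
--             # distância fixada em 7 entre índices das sentenças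
--             after_can_remove = True if (list_idx[i+1] - value) > 7 else False
--
--         # remove índice caso esteja muito distante dos demais
--         if before_can_remove and after_can_remove:
--             list_remove.append(i)
--
--     return list_remove
-- ===== SOURCE B (Python) =====
-- def list_idx_of_ignore_distant_senteces(list_idx):
--     # First collect the sparse list of gap positions k where the jump
--     # list_idx[k] -> list_idx[k+1] exceeds 7; an element is isolated exactly
--     # when two such big-gap positions are consecutive, so scan that sparse
--     # list for adjacent entries differing by 1 and emit the later position.
--     big = [k for k in range(len(list_idx) - 1) if list_idx[k + 1] - list_idx[k] > 7]
--     return [q for p, q in zip(big, big[1:]) if q == p + 1]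
-- ===== Notes on version B (the rewrite author's own statement) =====
-- stated objective: alternative
-- what changed: B first extracts the sparse list of big-gap positions (gaps > 7) and then detects isolated elements as adjacent entries of that sparse list differing by 1, instead of A's single enumerate pass testing both neighbor distances inline at every index.
import Mathlib
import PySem

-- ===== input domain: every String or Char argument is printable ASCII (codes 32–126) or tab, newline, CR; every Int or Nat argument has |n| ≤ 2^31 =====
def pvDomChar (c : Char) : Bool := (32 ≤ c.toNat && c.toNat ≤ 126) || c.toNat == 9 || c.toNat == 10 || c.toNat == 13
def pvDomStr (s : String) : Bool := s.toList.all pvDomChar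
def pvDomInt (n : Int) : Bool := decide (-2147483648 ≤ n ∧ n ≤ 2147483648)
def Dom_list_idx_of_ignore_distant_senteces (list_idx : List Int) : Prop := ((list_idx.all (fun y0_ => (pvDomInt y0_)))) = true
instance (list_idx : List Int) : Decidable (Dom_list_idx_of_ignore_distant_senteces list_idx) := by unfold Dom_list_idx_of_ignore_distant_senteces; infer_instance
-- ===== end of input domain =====

-- B first extracts the sparse list of big-gap positions (gaps > 7) and then finds isolated
-- elements as adjacent entries of that sparse list differing by 1, instead of A's single
-- enumerate pass testing both neighbor distances inline at every index; same cost.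

-- ===== PORT A =====
def list_idx_of_ignore_distant_senteces (list_idx : List Int) : List Int :=
  (PySem.List.enumerate list_idx).foldl (fun list_remove p =>
    let i := p.1
    let value := p.2
    let before_can_remove := if 0 < i then decide (value - PySem.List.pyGetD list_idx (i - 1) 0 > 7) else false
    let after_can_remove := if i < (list_idx.length : Int) - 1 then decide (PySem.List.pyGetD list_idx (i + 1) 0 - value > 7) else false
    if before_can_remove && after_can_remove then list_remove ++ [i] else list_remove) []

-- ===== PORT B =====
def list_idx_of_ignore_distant_senteces_alt (list_idx : List Int) : List Int :=
  let big := (PySem.List.pyRange 0 ((list_idx.length : Int) - 1) 1).filter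
    (fun k => decide (PySem.List.pyGetD list_idx (k + 1) 0 - PySem.List.pyGetD list_idx k 0 > 7))
  ((big.zip (big.drop 1)).filter (fun pq => pq.2 == pq.1 + 1)).map Prod.snd

-- ===== PRECONDITION & SPEC =====
def Spec_list_idx_of_ignore_distant_senteces (list_idx : List Int) (out : List Int) : Prop := out = list_idx_of_ignore_distant_senteces_alt list_idx
instance (list_idx : List Int) (out : List Int) : Decidable (Spec_list_idx_of_ignore_distant_senteces list_idx out) := by unfold Spec_list_idx_of_ignore_distant_senteces; infer_instance

-- ===== CLAIM (what is proved, stated in full; the proofs are below) =====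
def Claim_equal_list_idx_of_ignore_distant_senteces : Prop := ∀ (list_idx : List Int), Dom_list_idx_of_ignore_distant_senteces list_idx → Spec_list_idx_of_ignore_distant_senteces list_idx (list_idx_of_ignore_distant_senteces list_idx)

-- ===== LEMMAS AND PROOFS =====

-- A's fold, rewritten as a filter of the full index range
lemma portA_eq_filter (l : List Int) :
    list_idx_of_ignore_distant_senteces l
      = (PySem.List.pyRange 0 (l.length : Int) 1).filter (fun i =>
          (if 0 < i then decide (PySem.List.pyGetD l i 0 - PySem.List.pyGetD l (i - 1) 0 > 7) else false)
          && (if i < (l.length : Int) - 1 then decide (PySem.List.pyGetD l (i + 1) 0 - PySem.List.pyGetD l i 0 > 7) else false)) := by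
  unfold list_idx_of_ignore_distant_senteces
  rw [PySem.List.enumerate_eq_map_pyRange l 0]
  rw [PySem.List.foldl_append_if
      (p := fun p : Int × Int =>
        (if 0 < p.1 then decide (p.2 - PySem.List.pyGetD l (p.1 - 1) 0 > 7) else false)
        && (if p.1 < (l.length : Int) - 1 then decide (PySem.List.pyGetD l (p.1 + 1) 0 - p.2 > 7) else false))
      (f := fun p : Int × Int => p.1)]
  rw [List.filter_map, List.map_map]
  simp [PySem.List.len, Function.comp_def]

-- the consecutive-pair scan of B, as a standalone function for the proofs
def pvScan (L : List Int) : List Int :=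
  ((L.zip (L.drop 1)).filter (fun pq => pq.2 == pq.1 + 1)).map Prod.snd

lemma pvScan_cons_cons (a x : Int) (L : List Int) :
    pvScan (a :: x :: L) = (if x = a + 1 then [x] else []) ++ pvScan (x :: L) := by
  unfold pvScan
  simp only [List.drop_succ_cons, List.drop_zero, List.zip_cons_cons, List.filter_cons]
  by_cases h : x = a + 1 <;> simp [h]

-- core lemma: scanning the filtered range for consecutive big-gap positions
-- equals filtering the shifted range for "both this and the previous gap are big"
lemma scan_filter_range (P : Int → Bool) :
    ∀ (k : Nat) (a b : Int), (b - a).toNat = k →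
      pvScan ((PySem.List.pyRange a b 1).filter P)
        = (PySem.List.pyRange (a + 1) b 1).filter (fun i => P (i - 1) && P i) := by
  intro k
  induction k with
  | zero =>
    intro a b hk
    rw [PySem.List.pyRange_one_eq_nil (by omega), PySem.List.pyRange_one_eq_nil (by omega)]
    simp [pvScan]
  | succ n ih =>
    intro a b hk
    have hab : a < b := by omega
    have ih' := ih (a + 1) b (by omega)
    rw [PySem.List.pyRange_one_cons hab, List.filter_cons]
    by_cases hPa : P a = true
    · rw [if_pos hPa]
      set L := (PySem.List.pyRange (a + 1) b 1).filter P with hL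
      by_cases hb : a + 1 < b
      · rw [PySem.List.pyRange_one_cons hb, List.filter_cons,
            show a + 1 - 1 = a by ring]
        simp only [hPa, Bool.true_and]
        cases hLc : L with
        | nil =>
          -- no index right of a passes P; in particular a+1 fails P
          have hP1 : P (a + 1) = false := by
            rcases hP : P (a + 1) with _ | _
            · rfl
            · exfalso
              have : (a + 1) ∈ L := by
                rw [hL, List.mem_filter, PySem.List.mem_pyRange_one]
                exact ⟨⟨le_refl _, hb⟩, hP⟩
              simp [hLc] at this
          rw [hP1, if_neg (by simp), ← ih', hLc]
          simp [pvScan]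
        | cons x L' =>
          have hx : a + 1 ≤ x ∧ x < b ∧ P x = true := by
            have : x ∈ L := by simp [hLc]
            rw [hL, List.mem_filter, PySem.List.mem_pyRange_one] at this
            exact ⟨this.1.1, this.1.2, this.2⟩
          rw [hLc] at ih'
          rw [pvScan_cons_cons, ih']
          by_cases hP1 : P (a + 1) = true
          · -- a+1 passes P, so it is the head of L, i.e. x = a+1
            have hx1 : x = a + 1 := by
              have hhd : L = (a + 1) :: (PySem.List.pyRange (a + 1 + 1) b 1).filter P := by
                rw [hL, PySem.List.pyRange_one_cons hb, List.filter_cons, if_pos hP1]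
              rw [hhd] at hLc
              exact (List.cons_eq_cons.mp hLc.symm).1
            simp [hx1, hP1]
          · -- a+1 fails P, so x ≠ a+1 (since x passes P)
            have hx1 : ¬ (x = a + 1) := fun hc => hP1 (hc ▸ hx.2.2)
            simp [hx1, hP1]
      · -- a+1 ≥ b: everything right of a is empty
        have hLnil : L = [] := by
          rw [hL, PySem.List.pyRange_one_eq_nil (by omega)]; rfl
        rw [hLnil, PySem.List.pyRange_one_eq_nil (by omega)]
        simp [pvScan]
    · rw [if_neg hPa, ih']
      simp only [Bool.not_eq_true] at hPa
      by_cases hb : a + 1 < b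
      · rw [PySem.List.pyRange_one_cons hb, List.filter_cons,
            show a + 1 - 1 = a by ring]
        simp [hPa]
      · rw [PySem.List.pyRange_one_eq_nil (by omega), PySem.List.pyRange_one_eq_nil (by omega)]

lemma ports_agree : ∀ l : List Int, list_idx_of_ignore_distant_senteces l = list_idx_of_ignore_distant_senteces_alt l := by
  intro l
  rw [portA_eq_filter]
  unfold list_idx_of_ignore_distant_senteces_alt
  dsimp only
  rw [show ((((PySem.List.pyRange 0 ((l.length : Int) - 1) 1).filter
        (fun k => decide (PySem.List.pyGetD l (k + 1) 0 - PySem.List.pyGetD l k 0 > 7))).zip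
        (((PySem.List.pyRange 0 ((l.length : Int) - 1) 1).filter
        (fun k => decide (PySem.List.pyGetD l (k + 1) 0 - PySem.List.pyGetD l k 0 > 7))).drop 1)).filter
        (fun pq => pq.2 == pq.1 + 1)).map Prod.snd
      = pvScan ((PySem.List.pyRange 0 ((l.length : Int) - 1) 1).filter
        (fun k => decide (PySem.List.pyGetD l (k + 1) 0 - PySem.List.pyGetD l k 0 > 7))) from rfl]
  rw [scan_filter_range _ (((l.length : Int) - 1) - 0).toNat 0 ((l.length : Int) - 1) rfl]
  by_cases h0 : (l.length : Int) ≤ 0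
  · rw [PySem.List.pyRange_one_eq_nil h0, PySem.List.pyRange_one_eq_nil (by omega)]
    simp
  · by_cases h1 : (l.length : Int) = 1
    · rw [h1, PySem.List.pyRange_one_cons (by omega : (0:Int) < 1),
          PySem.List.pyRange_one_eq_nil (by omega : (1:Int) ≤ 0 + 1),
          PySem.List.pyRange_one_eq_nil (by omega : (1:Int) - 1 ≤ 0 + 1)]
      simp
    · rw [PySem.List.pyRange_one_append 0 1 (l.length : Int) (by omega) (by omega),
          PySem.List.pyRange_one_append 1 ((l.length : Int) - 1) (l.length : Int) (by omega) (by omega),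
          PySem.List.pyRange_one_cons (by omega : (0:Int) < 1),
          PySem.List.pyRange_one_eq_nil (by omega : (1:Int) ≤ 0 + 1),
          PySem.List.pyRange_one_cons (show ((l.length : Int) - 1) < (l.length : Int) by omega),
          PySem.List.pyRange_one_eq_nil (show ((l.length : Int)) ≤ (l.length : Int) - 1 + 1 by omega)]
    -- A's condition is false at index 0 and at the last index; on the interior it matches B's
      simp only [List.filter_cons, List.filter_append, List.filter_nil]
      norm_num
      rw [List.filter_congr]
      intro x hx
      rw [PySem.List.mem_pyRange_one] at hx
      simp [hx.2, show (0:Int) < x by omega]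
  
-- ===== VERDICT (by name: the statement is the Claim_ definition above) =====
theorem list_idx_of_ignore_distant_senteces_spec : Claim_equal_list_idx_of_ignore_distant_senteces := by
  intro l _
  unfold Spec_list_idx_of_ignore_distant_senteces
  exact ports_agree l
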